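-- pv_equiv track=rewrite | github.com/Nepomuceno/adventofcode-2021 | day16/part2.py | get_bin_from_hex
-- ===== SOURCE A (Python) =====
-- def get_bin_from_hex(hex_str: str) -> str:
--     result = ""
--     for i in range(len(hex_str)):
--         char = hex_str[i]
--         if char == "0":
--             result += "0000"
--         elif char == "1":
--             result += "0001"
--         elif char == "2":
--             result += "0010"
--         elif char == "3":
--             result += "0011"
--         elif char == "4":
--             result += "0100"
--         elif char == "5":
--             result += "0101"
--         elif char == "6":
--             result += "0110"
--         elif char == "7":
--             result += "0111"
--         elif char == "8":
--             result += "1000"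
--         elif char == "9":
--             result += "1001"
--         elif char == "A":
--             result += "1010"
--         elif char == "B":
--             result += "1011"
--         elif char == "C":
--             result += "1100"
--         elif char == "D":
--             result += "1101"
--         elif char == "E":
--             result += "1110"
--         elif char == "F":
--             result += "1111"
--         else:
--             raise Exception("Invalid character")
--     return result
-- ===== SOURCE B (Python) =====
-- def get_bin_from_hex(hex_str: str) -> str:
--     for ch in hex_str:
--         if ch not in "0123456789ABCDEF":
--             raise Exception("Invalid character")
--     if not hex_str:
--         return ""
--     return format(int(hex_str, 16), "0{}b".format(4 * len(hex_str)))
-- ===== Notes on version B (the rewrite author's own statement) =====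
-- stated objective: alternative
-- what changed: Instead of mapping each character to a 4-bit chunk and concatenating, B validates the string, converts the WHOLE string to a single integer with int(hex_str,16), and emits that number's binary expansion zero-padded to 4*len(hex_str) digits in one formatting step.
import Mathlib
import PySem

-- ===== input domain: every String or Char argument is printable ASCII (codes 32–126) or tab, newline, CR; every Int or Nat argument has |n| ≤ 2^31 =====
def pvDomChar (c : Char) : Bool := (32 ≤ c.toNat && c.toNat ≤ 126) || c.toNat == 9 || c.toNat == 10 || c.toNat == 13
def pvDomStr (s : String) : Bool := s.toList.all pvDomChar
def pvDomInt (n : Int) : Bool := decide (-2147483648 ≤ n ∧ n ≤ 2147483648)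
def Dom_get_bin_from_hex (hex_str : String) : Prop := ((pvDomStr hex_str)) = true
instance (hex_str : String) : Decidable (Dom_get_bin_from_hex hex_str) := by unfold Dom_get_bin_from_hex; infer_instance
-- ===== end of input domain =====

-- B converts the whole string to one integer (int(hex_str,16)) and emits its zero-padded binary expansion, instead of A's per-character 16-branch table concatenation (alternative algorithm; similar cost).


-- ===== PORT A =====
-- A's 16-way if/elif chain; the final else is Python's 'raise Exception' (excluded by Pre_),
-- rendered here as the empty contribution (unreachable inside Pre_).
def aBits (c : Char) : List Char :=
  if c = '0' then ['0','0','0','0']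
  else if c = '1' then ['0','0','0','1']
  else if c = '2' then ['0','0','1','0']
  else if c = '3' then ['0','0','1','1']
  else if c = '4' then ['0','1','0','0']
  else if c = '5' then ['0','1','0','1']
  else if c = '6' then ['0','1','1','0']
  else if c = '7' then ['0','1','1','1']
  else if c = '8' then ['1','0','0','0']
  else if c = '9' then ['1','0','0','1']
  else if c = 'A' then ['1','0','1','0']
  else if c = 'B' then ['1','0','1','1']
  else if c = 'C' then ['1','1','0','0']
  else if c = 'D' then ['1','1','0','1']
  else if c = 'E' then ['1','1','1','0']
  else if c = 'F' then ['1','1','1','1']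
  else []

def get_bin_from_hex (hex_str : String) : String :=
  String.ofList (hex_str.toList.foldl (fun acc c => acc ++ aBits c) [])

-- ===== PORT B =====
-- value of one uppercase hex digit (exact on '0'-'9','A'-'F', the only chars Pre_ admits)
def hexVal (c : Char) : Nat := if c.toNat ≤ 57 then c.toNat - 48 else c.toNat - 55

-- bin(n) without the '0b' prefix: most-significant-first binary digits (what format '%b' prints)
def natBin (n : Nat) : List Char :=
  if _h : n < 2 then [if n = 1 then '1' else '0']
  else natBin (n / 2) ++ [if n % 2 = 1 then '1' else '0']
  decreasing_by exact Nat.div_lt_self (by omega) (by omega)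

-- zero-pad on the left to width w (format's '0<w>b' padding)
def padTo (w : Nat) (ds : List Char) : List Char := List.replicate (w - ds.length) '0' ++ ds

def get_bin_from_hex_alt (hex_str : String) : String :=
  if hex_str.toList.isEmpty then ""
  else
    String.ofList (padTo (4 * hex_str.toList.length)
      (natBin (hex_str.toList.foldl (fun a c => 16 * a + hexVal c) 0)))

-- ===== PRECONDITION & SPEC =====
-- Pre_ excludes exactly the inputs containing a character outside '0'..'9','A'..'F', on which
-- both A and B raise Exception("Invalid character").
def Pre_get_bin_from_hex (hex_str : String) : Prop :=
  hex_str.toList.all (fun c => c ∈ ['0','1','2','3','4','5','6','7','8','9','A','B','C','D','E','F']) = true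
instance (hex_str : String) : Decidable (Pre_get_bin_from_hex hex_str) := by
  unfold Pre_get_bin_from_hex; infer_instance
def pvWitness_get_bin_from_hex : String := "A0F"

def Spec_get_bin_from_hex (hex_str : String) (out : String) : Prop := out = get_bin_from_hex_alt hex_str
instance (hex_str : String) (out : String) : Decidable (Spec_get_bin_from_hex hex_str out) := by unfold Spec_get_bin_from_hex; infer_instance

-- ===== CLAIM (what is proved, stated in full; the proofs are below) =====
def Claim_equal_get_bin_from_hex : Prop := ∀ (hex_str : String), Dom_get_bin_from_hex hex_str → Pre_get_bin_from_hex hex_str → Spec_get_bin_from_hex hex_str (get_bin_from_hex hex_str)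

-- ===== LEMMAS AND PROOFS =====
def hexChars : List Char := ['0','1','2','3','4','5','6','7','8','9','A','B','C','D','E','F']

-- the low-w bits of n, most significant first
def bitsFix : Nat → Nat → List Char
  | 0, _ => []
  | w+1, n => bitsFix w (n / 2) ++ [if n % 2 = 1 then '1' else '0']

theorem bitsFix_length : ∀ (w n : Nat), (bitsFix w n).length = w := by
  intro w
  induction w with
  | zero => intro n; rfl
  | succ w ih => intro n; simp [bitsFix, ih]

theorem bitsFix_zero : ∀ (w : Nat), bitsFix w 0 = List.replicate w '0' := by
  intro w
  induction w with
  | zero => rfl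
  | succ w ih => simp [bitsFix, ih, List.replicate_succ']

theorem bitsFix_split : ∀ (b a n : Nat), bitsFix (a + b) n = bitsFix a (n / 2 ^ b) ++ bitsFix b n := by
  intro b
  induction b with
  | zero => intro a n; simp [bitsFix]
  | succ b ih =>
    intro a n
    rw [show a + (b + 1) = (a + b) + 1 from by omega]
    show bitsFix (a + b) (n / 2) ++ _ = _
    rw [ih a (n / 2), Nat.div_div_eq_div_mul]
    have h2 : 2 * 2 ^ b = 2 ^ (b + 1) := by ring
    rw [h2, List.append_assoc]
    rfl

theorem bitsFix_mod : ∀ (w a r : Nat), bitsFix w (a * 2 ^ w + r) = bitsFix w r := by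
  intro w
  induction w with
  | zero => intro a r; rfl
  | succ w ih =>
    intro a r
    have hk : a * 2 ^ (w + 1) + r = 2 * (a * 2 ^ w) + r := by ring
    show bitsFix w ((a * 2 ^ (w + 1) + r) / 2) ++ _ = bitsFix w (r / 2) ++ _
    rw [hk]
    have h1 : (2 * (a * 2 ^ w) + r) / 2 = a * 2 ^ w + r / 2 := by omega
    have h2 : (2 * (a * 2 ^ w) + r) % 2 = r % 2 := by omega
    rw [h1, h2, ih]

theorem natBin_pad : ∀ (w n : Nat), 1 ≤ w → n < 2 ^ w → padTo w (natBin n) = bitsFix w n := by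
  intro w
  induction w with
  | zero => intro n h; omega
  | succ w ih =>
    intro n _ hlt
    by_cases hn : n < 2
    · rw [natBin]
      simp only [hn, dite_true]
      show padTo (w + 1) _ = bitsFix w (n / 2) ++ _
      have hd : n / 2 = 0 := by omega
      rw [hd, bitsFix_zero]
      have hn' : n = 0 ∨ n = 1 := by omega
      rcases hn' with h | h <;> subst h <;> simp [padTo]
    · have hw : 1 ≤ w := by
        by_contra h
        have : w = 0 := by omega
        subst this
        simp at hlt; omega
      rw [natBin]
      simp only [hn, dite_false]
      have hlen : (natBin (n / 2)).length ≤ w := by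
        have hh := ih (n / 2) hw (by
          have h2 : 2 ^ (w + 1) = 2 * 2 ^ w := by ring
          rw [h2] at hlt; omega)
        have := congrArg List.length hh
        simp [padTo, bitsFix_length] at this
        omega
      show padTo (w + 1) (natBin (n / 2) ++ _) = bitsFix w (n / 2) ++ _
      rw [← ih (n / 2) hw (by
        have h2 : 2 ^ (w + 1) = 2 * 2 ^ w := by ring
        rw [h2] at hlt; omega)]
      simp only [padTo, List.length_append, List.length_cons, List.length_nil]
      have : w + 1 - ((natBin (n / 2)).length + 1) = w - (natBin (n / 2)).length := by omega
      rw [this, ← List.append_assoc]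

theorem hexVal_lt (c : Char) (h : c ∈ hexChars) : hexVal c < 16 := by
  fin_cases h <;> decide

theorem foldl_hex_acc : ∀ (l : List Char) (a : Nat),
    l.foldl (fun a c => 16 * a + hexVal c) a
      = a * 16 ^ l.length + l.foldl (fun a c => 16 * a + hexVal c) 0 := by
  intro l
  induction l with
  | nil => intro a; simp
  | cons c l ih =>
    intro a
    simp only [List.foldl_cons, List.length_cons]
    rw [ih (16 * a + hexVal c), ih (16 * 0 + hexVal c)]
    ring

theorem valOf_lt (l : List Char) (h : ∀ c ∈ l, c ∈ hexChars) :
    l.foldl (fun a c => 16 * a + hexVal c) 0 < 16 ^ l.length := by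
  induction l with
  | nil => simp
  | cons c l ih =>
    simp only [List.foldl_cons, List.length_cons]
    rw [foldl_hex_acc]
    have h1 : hexVal c < 16 := hexVal_lt c (h c (by simp))
    have h2 := ih (fun x hx => h x (by simp [hx]))
    have h3 : (16 * 0 + hexVal c) * 16 ^ l.length ≤ 15 * 16 ^ l.length := by
      have : 16 * 0 + hexVal c ≤ 15 := by omega
      exact Nat.mul_le_mul_right _ this
    have : 16 ^ (l.length + 1) = 16 * 16 ^ l.length := by ring
    omega

theorem aBits_eq_bitsFix (c : Char) (h : c ∈ hexChars) : aBits c = bitsFix 4 (hexVal c) := by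
  fin_cases h <;> decide

theorem pow16 (L : Nat) : (16 : Nat) ^ L = 2 ^ (4 * L) := by
  rw [Nat.pow_mul]

theorem bits_flat : ∀ (l : List Char), (∀ c ∈ l, c ∈ hexChars) →
    bitsFix (4 * l.length) (l.foldl (fun a c => 16 * a + hexVal c) 0)
      = (l.map aBits).flatten := by
  intro l
  induction l with
  | nil => intro _; rfl
  | cons c l ih =>
    intro h
    have hc : c ∈ hexChars := h c (by simp)
    have hl : ∀ x ∈ l, x ∈ hexChars := fun x hx => h x (by simp [hx])
    simp only [List.foldl_cons, List.length_cons, List.map_cons, List.flatten_cons]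
    set L := l.length with hL
    set v := l.foldl (fun a c => 16 * a + hexVal c) 0 with hv
    have hvlt : v < 2 ^ (4 * L) := by rw [← pow16]; exact valOf_lt l hl
    have hfold : l.foldl (fun a c => 16 * a + hexVal c) (16 * 0 + hexVal c)
        = hexVal c * 2 ^ (4 * L) + v := by
      rw [foldl_hex_acc, ← hv, ← hL, pow16]
      have he : 16 * 0 + hexVal c = hexVal c := by omega
      rw [he]
    have h4 : 4 * (L + 1) = 4 + 4 * L := by ring
    rw [hfold, h4, bitsFix_split]
    have hdiv : (hexVal c * 2 ^ (4 * L) + v) / 2 ^ (4 * L) = hexVal c := by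
      rw [Nat.mul_comm (hexVal c) (2 ^ (4 * L)), Nat.mul_add_div (Nat.pow_pos (by norm_num)),
          Nat.div_eq_of_lt hvlt]
      omega
    rw [hdiv, bitsFix_mod, ih hl, aBits_eq_bitsFix c hc]

theorem foldl_append_aBits (l : List Char) (acc : List Char) :
    l.foldl (fun acc c => acc ++ aBits c) acc = acc ++ (l.map aBits).flatten := by
  induction l generalizing acc with
  | nil => simp
  | cons x xs ih => simp [List.foldl_cons, ih, List.append_assoc]

-- ===== VERDICT (by name: the statement is the Claim_ definition above) =====
theorem get_bin_from_hex_spec : Claim_equal_get_bin_from_hex := by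
  intro s _ hpre
  rw [Pre_get_bin_from_hex, List.all_eq_true] at hpre
  have hval : ∀ c ∈ s.toList, c ∈ hexChars := by
    intro c hc
    have := hpre c hc
    simpa [hexChars] using this
  unfold Spec_get_bin_from_hex get_bin_from_hex get_bin_from_hex_alt
  by_cases hemp : s.toList.isEmpty
  · rw [if_pos hemp]
    rw [List.isEmpty_iff] at hemp
    rw [hemp]
    rfl
  · rw [if_neg hemp]
    rw [foldl_append_aBits, List.nil_append, ← bits_flat s.toList hval]
    have hlen : 1 ≤ s.toList.length := by
      rw [List.isEmpty_iff] at hemp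
      cases h : s.toList with
      | nil => exact absurd h hemp
      | cons a l => simp
    rw [natBin_pad (4 * s.toList.length)
          (s.toList.foldl (fun a c => 16 * a + hexVal c) 0)
          (by omega)
          (by rw [← pow16]; exact valOf_lt s.toList hval)]
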